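-- pv_equiv track=rewrite | github.com/Joaoguzman/PROYECTO_ABACO_DIGITAL | funciones/funciones.py | actualiza
-- ===== SOURCE A (Python) =====
-- def cambia_digito(digito):
--     if digito == 1:
--         return 8
--     elif digito == 2:
--         return 7
--     elif digito == 3:
--         return 6
--     elif digito == 4:
--         return 5
--     elif digito == 5:
--         return 4
--     elif digito == 6:
--         return 3
--     elif digito == 7:
--         return 2
--     elif digito == 8:
--         return 1
--     elif digito == 9:
--         return 0
--     elif digito == 0:
--         return 10
--
-- def actualiza(diccionario,numero):
--     marcador = ["cm","dm","mi","ce","de","un"]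
--     cont_numero = 0
--
--     for clave in range(0,len(numero)):
--         abaco = []
--         for estado in range(0,11):
--             if estado == 0 :
--                 abaco.append("   +-+  ")
--             elif estado == 10:
--                 abaco.append("   {}   ".format(marcador[cont_numero]))
--             elif estado >=1 and estado <=cambia_digito(numero[cont_numero]):
--                 abaco.append("   | |  ")
--             else:
--                 abaco.append("  ##### ")
--         cont_numero = cont_numero + 1
--         diccionario[clave] = abaco
--     return diccionario
-- ===== SOURCE B (Python) =====
-- def cambia_digito(digito):
--     if digito == 1:
--         return 8
--     elif digito == 2:
--         return 7
--     elif digito == 3: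
--         return 6
--     elif digito == 4:
--         return 5
--     elif digito == 5:
--         return 4
--     elif digito == 6:
--         return 3
--     elif digito == 7:
--         return 2
--     elif digito == 8:
--         return 1
--     elif digito == 9:
--         return 0
--     elif digito == 0:
--         return 10
--
--
-- def actualiza(diccionario, numero):
--     marcador = ["cm", "dm", "mi", "ce", "de", "un"]
--     for i, d in enumerate(numero):
--         p = min(cambia_digito(d), 9)
--         diccionario[i] = (["   +-+  "]
--                           + ["   | |  "] * p
--                           + ["  ##### "] * (9 - p)
--                           + ["   {}   ".format(marcador[i])])
--     return diccionario
-- ===== Notes on version B (the rewrite author's own statement) =====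
-- stated objective: simpler
-- what changed: B replaces A's inner 11-iteration state machine with branch chains by direct construction of each column via list concatenation/repetition from the threshold min(cambia_digito(d), 9); same mutation of diccionario in place.
import Mathlib
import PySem

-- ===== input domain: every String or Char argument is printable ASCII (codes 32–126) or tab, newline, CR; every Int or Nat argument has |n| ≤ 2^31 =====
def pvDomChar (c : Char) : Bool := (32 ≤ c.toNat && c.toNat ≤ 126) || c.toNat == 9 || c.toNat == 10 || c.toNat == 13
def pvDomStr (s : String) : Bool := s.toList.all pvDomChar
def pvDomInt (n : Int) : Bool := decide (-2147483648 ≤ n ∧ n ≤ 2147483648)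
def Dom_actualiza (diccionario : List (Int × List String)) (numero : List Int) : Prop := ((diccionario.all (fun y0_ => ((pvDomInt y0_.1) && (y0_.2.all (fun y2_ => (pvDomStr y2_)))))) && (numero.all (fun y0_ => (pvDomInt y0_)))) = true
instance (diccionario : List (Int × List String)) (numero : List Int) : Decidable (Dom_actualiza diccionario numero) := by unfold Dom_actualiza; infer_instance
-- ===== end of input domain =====

-- B builds each abacus column by list concatenation/repetition from the digit's threshold
-- instead of A's 11-step state machine with branch chains; same return value (both Pythons
-- also mutate `diccionario` in place identically; the equivalence proved is about the value).


-- ===== PORT A =====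
-- cambia_digito: none = Python's implicit `return None` for digits outside 0..9
def cambia_digito (digito : Int) : Option Int :=
  if digito = 1 then some 8
  else if digito = 2 then some 7
  else if digito = 3 then some 6
  else if digito = 4 then some 5
  else if digito = 5 then some 4
  else if digito = 6 then some 3
  else if digito = 7 then some 2
  else if digito = 8 then some 1
  else if digito = 9 then some 0
  else if digito = 0 then some 10
  else none

def marcador : List String := ["cm", "dm", "mi", "ce", "de", "un"]

-- `estado <= cambia_digito(...)`: false on None is arbitrary — Python raises TypeError
-- there, excluded by Pre_actualiza.
def leOpt (e : Int) : Option Int → Bool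
  | some t => e ≤ t
  | none => false

-- A's inner `for estado in range(0,11)` loop building `abaco`.
def abacoA (digito : Int) (mark : String) : List String :=
  (PySem.List.pyRange 0 11 1).foldl
    (fun abaco estado =>
      if estado = 0 then abaco ++ ["   +-+  "]
      else if estado = 10 then abaco ++ ["   " ++ mark ++ "   "]
      else if 1 ≤ estado ∧ leOpt estado (cambia_digito digito) = true then abaco ++ ["   | |  "]
      else abaco ++ ["  ##### "]) []

-- Outer loop: state (cont_numero, diccionario); `diccionario[clave] = abaco` is Dict.insert.
-- numero[cont_numero] and marcador[cont_numero]: pyGetD is exact here since inside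
-- Pre_actualiza both indices are in range (Python raises IndexError otherwise).
def actualiza (diccionario : List (Int × List String)) (numero : List Int) : List (Int × List String) :=
  ((PySem.List.pyRange 0 (numero.length : Int) 1).foldl
    (fun (st : Int × PySem.Dict Int (List String)) clave =>
      let abaco := abacoA (PySem.List.pyGetD numero st.1 0) (PySem.List.pyGetD marcador st.1 "")
      (st.1 + 1, st.2.insert clave abaco))
    (0, PySem.Dict.mk diccionario)).2.items

-- ===== PORT B =====
-- B's column: top bar, p pipes, 9-p beads, marker line.
-- `min(cambia_digito(d), 9)` raises TypeError in Python on None (outside Pre_; branch value arbitrary).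
def columnaB (digito : Int) (mark : String) : List String :=
  let p : Int := match cambia_digito digito with
                 | some t => min t 9
                 | none => 0
  ["   +-+  "] ++ List.replicate p.toNat "   | |  "
    ++ List.replicate (9 - p).toNat "  ##### " ++ ["   " ++ mark ++ "   "]

def actualiza_alt (diccionario : List (Int × List String)) (numero : List Int) : List (Int × List String) :=
  ((PySem.List.enumerate numero).foldl
    (fun (d : PySem.Dict Int (List String)) id =>
      d.insert id.1 (columnaB id.2 (PySem.List.pyGetD marcador id.1 "")))
    (PySem.Dict.mk diccionario)).items

-- ===== PRECONDITION & SPEC =====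
-- Pre_ excludes exactly where the Python A raises: a digit outside 0..9 makes
-- cambia_digito return None and `estado <= None` raises TypeError; more than 6 digits
-- makes marcador[cont_numero] raise IndexError.
def Pre_actualiza (diccionario : List (Int × List String)) (numero : List Int) : Prop :=
  numero.length ≤ 6 ∧ ∀ d ∈ numero, 0 ≤ d ∧ d ≤ 9
instance (diccionario : List (Int × List String)) (numero : List Int) : Decidable (Pre_actualiza diccionario numero) := by unfold Pre_actualiza; infer_instance

def pvWitness_actualiza : (List (Int × List String)) × List Int := ([(7, ["x"])], [0, 5, 9])

def Spec_actualiza (diccionario : List (Int × List String)) (numero : List Int) (out : List (Int × List String)) : Prop := out = actualiza_alt diccionario numero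
instance (diccionario : List (Int × List String)) (numero : List Int) (out : List (Int × List String)) : Decidable (Spec_actualiza diccionario numero out) := by unfold Spec_actualiza; infer_instance

-- ===== CLAIM (what is proved, stated in full; the proofs are below) =====
def Claim_equal_actualiza : Prop := ∀ (diccionario : List (Int × List String)) (numero : List Int), Dom_actualiza diccionario numero → Pre_actualiza diccionario numero → Spec_actualiza diccionario numero (actualiza diccionario numero)

-- ===== LEMMAS AND PROOFS =====

-- For an in-range digit the two column builders agree (the marker string is arbitrary).
lemma col_eq (d : Int) (m : String) (h0 : 0 ≤ d) (h9 : d ≤ 9) :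
    abacoA d m = columnaB d m := by
  interval_cases d <;> rfl

-- The two folds agree: A walks indices c, c+1, … with numero[c] looked up, B walks the
-- enumerated suffix of numero directly.
lemma loop_eq (numero : List Int) (hd : ∀ d ∈ numero, 0 ≤ d ∧ d ≤ 9) :
    ∀ (tail : List Int) (c : Int) (dict : PySem.Dict Int (List String)),
      0 ≤ c → tail = numero.drop c.toNat →
      ((PySem.List.pyRange c (numero.length : Int) 1).foldl
        (fun (st : Int × PySem.Dict Int (List String)) clave =>
          let abaco := abacoA (PySem.List.pyGetD numero st.1 0) (PySem.List.pyGetD marcador st.1 "")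
          (st.1 + 1, st.2.insert clave abaco))
        (c, dict)).2
      = (PySem.List.enumerate tail c).foldl
          (fun (d : PySem.Dict Int (List String)) id =>
            d.insert id.1 (columnaB id.2 (PySem.List.pyGetD marcador id.1 "")))
          dict := by
  intro tail
  induction tail with
  | nil =>
    intro c dict hc hdrop
    have hlen : numero.length ≤ c.toNat := by
      by_contra h
      push_neg at h
      have := List.drop_eq_nil_iff.mp hdrop.symm
      omega
    rw [PySem.List.pyRange_one_eq_nil (by omega), PySem.List.enumerate_nil]
    rfl
  | cons x tl ih =>
    intro c dict hc hdrop
    have hlt : c.toNat < numero.length := by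
      by_contra h
      push_neg at h
      rw [List.drop_eq_nil_of_le h] at hdrop
      exact List.cons_ne_nil _ _ hdrop
    have hdc : x :: tl = numero[c.toNat] :: numero.drop (c.toNat + 1) := by
      rw [List.getElem_cons_drop]
      exact hdrop
    have hx : numero[c.toNat] = x := ((List.cons_eq_cons.mp hdc).1).symm
    have htl : tl = numero.drop (c + 1).toNat := by
      rw [show (c + 1).toNat = c.toNat + 1 by omega]
      exact (List.cons_eq_cons.mp hdc).2
    rw [PySem.List.pyRange_one_cons (by omega), PySem.List.enumerate_cons]
    simp only [List.foldl_cons]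
    have hget : PySem.List.pyGetD numero c 0 = x := by
      rw [PySem.List.pyGetD_of_nonneg numero 0 hc, List.getD_eq_getElem?_getD,
        List.getElem?_eq_getElem hlt, hx]
      rfl
    have hxmem : x ∈ numero := hx ▸ numero.getElem_mem hlt
    rw [hget, col_eq x _ (hd x hxmem).1 (hd x hxmem).2]
    exact ih (c + 1) _ (by omega) htl

-- ===== VERDICT (by name: the statement is the Claim_ definition above) =====
theorem actualiza_spec : Claim_equal_actualiza := by
  intro diccionario numero _ hpre
  unfold Spec_actualiza actualiza actualiza_alt
  rw [loop_eq numero hpre.2 numero 0 (PySem.Dict.mk diccionario) le_rfl rfl]
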